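-- pv_equiv track=rewrite | github.com/visionsss/PAT | base_level/1003.py | judge1
-- ===== SOURCE A (Python) =====
-- def judge1(s):
--     for ii in s:
--         if ii != 'P' and ii != 'A' and ii != 'T':
--             return False
--     if 'P' in s and 'A' in s and 'T' in s:
--         if s.count('P') == 1 and s.count('T') == 1:
--             if s.index('T') > s.index('P')+1:
--                 return True
--             else:
--                 return False
--         return False
--     else:
--         return False
-- ===== SOURCE B (Python) =====
-- def judge1(s):
--     head, p, rest = s.partition('P')
--     mid, t, tail = rest.partition('T')
--     return (p == 'P' and t == 'T' and mid != ''
--             and set(head) <= {'A'} and set(mid) <= {'A'} and set(tail) <= {'A'})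
-- ===== Notes on version B (the rewrite author's own statement) =====
-- stated objective: simpler
-- what changed: Replaces the char loop plus separate membership/count/index scans with two str.partition splits (at the first 'P' and then the first 'T') and all-'A' checks of the three pieces, i.e. a direct parse of the shape A*PA+TA*.
import Mathlib
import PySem

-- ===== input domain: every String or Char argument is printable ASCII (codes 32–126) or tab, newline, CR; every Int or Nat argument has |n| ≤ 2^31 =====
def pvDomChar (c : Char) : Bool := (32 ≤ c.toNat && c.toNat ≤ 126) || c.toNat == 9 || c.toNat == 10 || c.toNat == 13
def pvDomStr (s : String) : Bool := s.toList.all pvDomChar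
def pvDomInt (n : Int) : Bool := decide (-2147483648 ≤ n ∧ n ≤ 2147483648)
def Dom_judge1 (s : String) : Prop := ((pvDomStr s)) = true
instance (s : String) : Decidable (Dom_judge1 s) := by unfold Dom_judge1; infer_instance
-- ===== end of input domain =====

-- B parses the shape A*PA+TA* directly with two partition splits instead of A's loop plus membership/count/index scans.

-- ===== PORT A =====
-- the 'for ii in s: if …: return False' loop
def judge1Loop : List Char → Bool
  | [] => true
  | c :: cs => if c ≠ 'P' ∧ c ≠ 'A' ∧ c ≠ 'T' then false else judge1Loop cs

def judge1 (s : String) : Bool :=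
  if judge1Loop s.toList then
    if s.toList.contains 'P' ∧ s.toList.contains 'A' ∧ s.toList.contains 'T' then
      if s.toList.count 'P' = 1 ∧ s.toList.count 'T' = 1 then
        -- s.index is guarded by the membership test above, so index? is some here
        match PySem.List.index? s.toList 'T', PySem.List.index? s.toList 'P' with
        | some it, some ip => decide (it > ip + 1)
        | _, _ => false
      else false
    else false
  else false

-- ===== PORT B =====
-- str.partition(c): (before, sep, after) at the first occurrence, or (s, '', '') if c absent
def pyPartition (c : Char) : List Char → List Char × List Char × List Char
  | [] => ([], [], [])
  | x :: xs =>
    if x = c then ([], [c], xs)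
    else
      let r := pyPartition c xs
      (x :: r.1, r.2.1, r.2.2)

def judge1_alt (s : String) : Bool :=
  let r1 := pyPartition 'P' s.toList   -- head, p, rest = r1.1, r1.2.1, r1.2.2
  let r2 := pyPartition 'T' r1.2.2     -- mid, t, tail = r2.1, r2.2.1, r2.2.2
  r1.2.1 == ['P'] && r2.2.1 == ['T'] && !(r2.1 == []) &&
    r1.1.all (· == 'A') && r2.1.all (· == 'A') && r2.2.2.all (· == 'A')

-- ===== PRECONDITION & SPEC =====
def Spec_judge1 (s : String) (out : Bool) : Prop := out = judge1_alt s
instance (s : String) (out : Bool) : Decidable (Spec_judge1 s out) := by unfold Spec_judge1; infer_instance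

-- ===== CLAIM (what is proved, stated in full; the proofs are below) =====
def Claim_equal_judge1 : Prop := ∀ (s : String), Dom_judge1 s → Spec_judge1 s (judge1 s)

-- ===== LEMMAS AND PROOFS =====

-- canonical characterisation of the accepted language: A*PA+TA*
def Canon (l : List Char) : Prop :=
  ∃ h m t, l = h ++ 'P' :: (m ++ 'T' :: t) ∧ m ≠ [] ∧
    (∀ x ∈ h, x = 'A') ∧ (∀ x ∈ m, x = 'A') ∧ (∀ x ∈ t, x = 'A')

theorem judge1Loop_eq_true (l : List Char) :
    judge1Loop l = true ↔ ∀ c ∈ l, c = 'P' ∨ c = 'A' ∨ c = 'T' := by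
  induction l with
  | nil => simp [judge1Loop]
  | cons c cs ih =>
    by_cases h : c ≠ 'P' ∧ c ≠ 'A' ∧ c ≠ 'T'
    · simp only [judge1Loop, if_pos h, List.forall_mem_cons]
      constructor
      · intro hF; exact absurd hF (by simp)
      · rintro ⟨hc, -⟩; exact absurd hc (by tauto)
    · simp only [judge1Loop, if_neg h, ih, List.forall_mem_cons]
      have hc : c = 'P' ∨ c = 'A' ∨ c = 'T' := by tauto
      exact ⟨fun H => ⟨hc, H⟩, fun H => H.2⟩

theorem pyPartition_spec (c : Char) (l : List Char) :
    (c ∉ l ∧ pyPartition c l = (l, [], [])) ∨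
    (∃ h t, c ∉ h ∧ l = h ++ c :: t ∧ pyPartition c l = (h, [c], t)) := by
  induction l with
  | nil => left; simp [pyPartition]
  | cons x xs ih =>
    by_cases hx : x = c
    · right; exact ⟨[], xs, by simp, by simp [hx], by simp [pyPartition, hx]⟩
    · rcases ih with ⟨hmem, heq⟩ | ⟨h, t, hmem, hdec, heq⟩
      · left
        refine ⟨?_, by simp [pyPartition, hx, heq]⟩
        simp [hmem, Ne.symm hx]
      · right
        refine ⟨x :: h, t, ?_, by simp [hdec], by simp [pyPartition, hx, heq]⟩
        simp [hmem, Ne.symm hx]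

theorem pyPartition_prefix (c : Char) (h t : List Char) (hc : c ∉ h) :
    pyPartition c (h ++ c :: t) = (h, [c], t) := by
  induction h with
  | nil => simp [pyPartition]
  | cons x xs ih =>
    simp only [List.mem_cons, not_or] at hc
    simp [pyPartition, Ne.symm hc.1, ih hc.2]

theorem judge1_alt_iff (s : String) : judge1_alt s = true ↔ Canon s.toList := by
  constructor
  · intro hb
    simp only [judge1_alt] at hb
    rcases pyPartition_spec 'P' s.toList with ⟨_, heq1⟩ | ⟨h, rest, hPh, hdec1, heq1⟩
    · rw [heq1] at hb; simp at hb
    · rw [heq1] at hb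
      rcases pyPartition_spec 'T' rest with ⟨_, heq2⟩ | ⟨m, t, hTm, hdec2, heq2⟩
      · rw [heq2] at hb; simp at hb
      · rw [heq2] at hb
        simp only [Bool.and_eq_true, beq_iff_eq, Bool.not_eq_true', List.all_eq_true,
          beq_eq_false_iff_ne] at hb
        refine ⟨h, m, t, by rw [hdec1, hdec2], ?_, ?_, ?_, ?_⟩ <;> tauto
  · rintro ⟨h, m, t, hdec, hm, hA, mA, tA⟩
    have hPh : 'P' ∉ h := fun hx => by simpa using hA 'P' hx
    have hTm : 'T' ∉ m := fun hx => by simpa using mA 'T' hx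
    simp only [judge1_alt]
    rw [hdec, pyPartition_prefix 'P' h _ hPh]
    simp only
    rw [pyPartition_prefix 'T' m t hTm]
    simp only [beq_self_eq_true, Bool.true_and, Bool.and_eq_true, Bool.not_eq_true',
      List.all_eq_true, beq_iff_eq, beq_eq_false_iff_ne]
    tauto

theorem judge1_iff (s : String) : judge1 s = true ↔ Canon s.toList := by
  constructor
  · intro ha
    unfold judge1 at ha
    split_ifs at ha with h1 h2 h3
    · -- all three guards passed
      have hP : 'P' ∈ s.toList := by simpa using h2.1
      have hT : 'T' ∈ s.toList := by simpa using h2.2.2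
      obtain ⟨ip, hip⟩ : ∃ ip, PySem.List.index? s.toList 'P' = some ip := by
        have := (PySem.List.index?_isSome_iff s.toList 'P').mpr hP
        exact Option.isSome_iff_exists.mp this
      obtain ⟨it, hit⟩ : ∃ it, PySem.List.index? s.toList 'T' = some it := by
        have := (PySem.List.index?_isSome_iff s.toList 'T').mpr hT
        exact Option.isSome_iff_exists.mp this
      rw [hit, hip] at ha
      have hgt : it > ip + 1 := by simpa using ha
      rcases (PySem.List.index?_eq_some_iff s.toList 'P' ip).mp hip with
        ⟨h, t1, hdec, hlen, hPh⟩
      -- 'P' occurs only once, so 'P' ∉ t1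
      have hcntP := h3.1
      rw [hdec] at hcntP
      simp only [List.count_append, List.count_cons_self] at hcntP
      have hPh0 : h.count 'P' = 0 := List.count_eq_zero.mpr hPh
      have hPt1 : 'P' ∉ t1 := by
        apply List.count_eq_zero.mp; omega
      -- 'T' is not in h (its index is bigger than 'P''s)
      have hTh : 'T' ∉ h := by
        intro hmem
        have : PySem.List.index? s.toList 'T' = PySem.List.index? h 'T' := by
          rw [hdec]; exact PySem.List.index?_append_of_mem _ hmem
        obtain ⟨k, hk⟩ : ∃ k, PySem.List.index? h 'T' = some k :=
          Option.isSome_iff_exists.mp ((PySem.List.index?_isSome_iff h 'T').mpr hmem)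
        rcases (PySem.List.index?_eq_some_iff h 'T' k).mp hk with ⟨p1, s1, hdh, hl1, _⟩
        have hklt : k < h.length := by
          have hlen2 := congrArg List.length hdh
          simp at hlen2
          omega
        rw [this, hk] at hit
        have hki : k = it := Option.some.inj hit
        omega
      -- so 'T' ∈ t1; split t1 at its first 'T'
      have hTt1 : 'T' ∈ t1 := by
        rw [hdec] at hT
        rcases List.mem_append.mp hT with hc | hc
        · exact absurd hc hTh
        · rcases List.mem_cons.mp hc with hc | hc
          · exact absurd hc (by decide)
          · exact hc
      obtain ⟨j, hj⟩ : ∃ j, PySem.List.index? t1 'T' = some j :=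
        Option.isSome_iff_exists.mp ((PySem.List.index?_isSome_iff t1 'T').mpr hTt1)
      rcases (PySem.List.index?_eq_some_iff t1 'T' j).mp hj with ⟨m, t2, hdt, hjl, hTm⟩
      -- index of 'T' in the whole list
      have hitval : PySem.List.index? s.toList 'T' = some (h.length + 1 + m.length) := by
        apply (PySem.List.index?_eq_some_iff s.toList 'T' _).mpr
        refine ⟨h ++ 'P' :: m, t2, ?_, by simp; omega, ?_⟩
        · rw [hdec, hdt]; simp
        · simp only [List.mem_append, List.mem_cons, not_or]
          exact ⟨hTh, by decide, hTm⟩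
      have hitv : it = h.length + 1 + m.length :=
        (Option.some.inj (hitval.symm.trans hit)).symm
      -- count of 'T' forces 'T' ∉ t2
      have hcntT := h3.2
      rw [hdec, hdt] at hcntT
      simp only [List.count_append, List.count_cons_self, List.count_cons] at hcntT
      have hTh0 : h.count 'T' = 0 := List.count_eq_zero.mpr hTh
      have hTm0 : m.count 'T' = 0 := List.count_eq_zero.mpr hTm
      have hTt2 : 'T' ∉ t2 := by
        apply List.count_eq_zero.mp
        simp [hTh0, hTm0] at hcntT ⊢
        omega
      have hPm : 'P' ∉ m := fun hx => hPt1 (by rw [hdt]; simp [hx])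
      have hPt2 : 'P' ∉ t2 := fun hx => hPt1 (by rw [hdt]; simp [hx])
      have hall := (judge1Loop_eq_true s.toList).mp h1
      refine ⟨h, m, t2, by rw [hdec, hdt], ?_, ?_, ?_, ?_⟩
      · intro hnil; rw [hnil] at hitv; simp at hitv; omega
      · intro x hx
        rcases hall x (by rw [hdec]; simp [hx]) with rfl | rfl | rfl
        · exact absurd hx hPh
        · rfl
        · exact absurd hx hTh
      · intro x hx
        have hxl : x ∈ s.toList := by rw [hdec, hdt]; simp [hx]
        rcases hall x hxl with rfl | rfl | rfl
        · exact absurd hx hPm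
        · rfl
        · exact absurd hx hTm
      · intro x hx
        have hxl : x ∈ s.toList := by rw [hdec, hdt]; simp [hx]
        rcases hall x hxl with rfl | rfl | rfl
        · exact absurd hx hPt2
        · rfl
        · exact absurd hx hTt2
  · rintro ⟨h, m, t, hdec, hm, hA, mA, tA⟩
    have hPh : 'P' ∉ h := fun hx => by simpa using hA 'P' hx
    have hPm : 'P' ∉ m := fun hx => by simpa using mA 'P' hx
    have hPt : 'P' ∉ t := fun hx => by simpa using tA 'P' hx
    have hTh : 'T' ∉ h := fun hx => by simpa using hA 'T' hx
    have hTm : 'T' ∉ m := fun hx => by simpa using mA 'T' hx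
    have hTt : 'T' ∉ t := fun hx => by simpa using tA 'T' hx
    obtain ⟨a, ham⟩ := List.exists_mem_of_ne_nil m hm
    have haA : a = 'A' := mA a ham
    have h1 : judge1Loop s.toList = true := by
      rw [judge1Loop_eq_true]
      intro c hc
      rw [hdec] at hc
      simp only [List.mem_append, List.mem_cons] at hc
      rcases hc with hc | hc | hc | hc | hc
      · exact Or.inr (Or.inl (hA c hc))
      · exact Or.inl hc
      · exact Or.inr (Or.inl (mA c hc))
      · exact Or.inr (Or.inr hc)
      · exact Or.inr (Or.inl (tA c hc))
    have h2 : s.toList.contains 'P' ∧ s.toList.contains 'A' ∧ s.toList.contains 'T' := by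
      refine ⟨?_, ?_, ?_⟩ <;> simp only [List.contains_iff_mem] <;> rw [hdec]
      · simp
      · exact List.mem_append.mpr (Or.inr (List.mem_cons.mpr (Or.inr
          (List.mem_append.mpr (Or.inl (haA ▸ ham))))))
      · simp
    have h3 : s.toList.count 'P' = 1 ∧ s.toList.count 'T' = 1 := by
      rw [hdec]
      simp [List.count_append, List.count_eq_zero.mpr hPh,
        List.count_eq_zero.mpr hPm, List.count_eq_zero.mpr hPt,
        List.count_eq_zero.mpr hTh, List.count_eq_zero.mpr hTm,
        List.count_eq_zero.mpr hTt]
    have hip : PySem.List.index? s.toList 'P' = some h.length :=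
      (PySem.List.index?_eq_some_iff _ _ _).mpr ⟨h, m ++ 'T' :: t, hdec, rfl, hPh⟩
    have hit : PySem.List.index? s.toList 'T' = some (h.length + 1 + m.length) := by
      apply (PySem.List.index?_eq_some_iff _ _ _).mpr
      refine ⟨h ++ 'P' :: m, t, by rw [hdec]; simp, by simp; omega, ?_⟩
      simp only [List.mem_append, List.mem_cons, not_or]
      exact ⟨hTh, by decide, hTm⟩
    unfold judge1
    rw [if_pos h1, if_pos h2, if_pos h3, hit, hip]
    simp only [gt_iff_lt, decide_eq_true_eq]
    have : 0 < m.length := List.length_pos_of_ne_nil hm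
    omega

-- ===== VERDICT (by name: the statement is the Claim_ definition above) =====
theorem judge1_spec : Claim_equal_judge1 := by
  intro s _
  unfold Spec_judge1
  have hiff := (judge1_iff s).trans (judge1_alt_iff s).symm
  cases h1 : judge1 s <;> cases h2 : judge1_alt s <;> simp [h1, h2] at hiff ⊢
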